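-- pv_equiv track=rewrite | github.com/hackclub/terminalcraft | submissions/Axon/core/mindmap.py | map_node_depths
-- ===== SOURCE A (Python) =====
-- from collections import defaultdict, deque
--
-- def map_node_depths(links, start, max_depth=3):
--     """Map nodes by depth from starting node using BFS"""
--     if not links or start not in links and not any(start in targets for targets in links.values()):
--         # fallback if node isn't in the graph
--         return {0: [start]}
--
--     seen = set()
--     by_depth = defaultdict(list)
--     q = deque([(start, 0)])  # (node, depth)
--
--     while q:
--         node, depth = q.popleft()
--
--         # stop if we've seen this or gone too deep
--         if node in seen or depth > max_depth:
--             continue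
--
--         seen.add(node)
--         by_depth[depth].append(node)
--
--         # add connected nodes to queue
--         for next_node in links.get(node, []):
--             if next_node not in seen:
--                 q.append((next_node, depth + 1))
--
--     return by_depth
-- ===== SOURCE B (Python) =====
-- from collections import defaultdict
--
-- def map_node_depths(links, start, max_depth=3):
--     """Map nodes by depth from starting node using level-synchronous BFS"""
--     if not links or start not in links and not any(start in targets for targets in links.values()):
--         # fallback if node isn't in the graph
--         return {0: [start]}
--
--     seen = set()
--     by_depth = defaultdict(list)
--     frontier = [start]
--     depth = 0
--
--     while frontier and depth <= max_depth:
--         nxt = []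
--         for node in frontier:
--             if node in seen:
--                 continue
--             seen.add(node)
--             by_depth[depth].append(node)
--             for nb in links.get(node, []):
--                 if nb not in seen:
--                     nxt.append(nb)
--         frontier = nxt
--         depth += 1
--
--     return by_depth
-- ===== Notes on version B (the rewrite author's own statement) =====
-- stated objective: alternative
-- what changed: Replaces the deque of (node, depth) pairs popped one at a time by a level-synchronous BFS that processes a whole frontier list per depth and builds the next frontier, so no depth is stored per node and no over-deep entries are ever enqueued.
import Mathlib
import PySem

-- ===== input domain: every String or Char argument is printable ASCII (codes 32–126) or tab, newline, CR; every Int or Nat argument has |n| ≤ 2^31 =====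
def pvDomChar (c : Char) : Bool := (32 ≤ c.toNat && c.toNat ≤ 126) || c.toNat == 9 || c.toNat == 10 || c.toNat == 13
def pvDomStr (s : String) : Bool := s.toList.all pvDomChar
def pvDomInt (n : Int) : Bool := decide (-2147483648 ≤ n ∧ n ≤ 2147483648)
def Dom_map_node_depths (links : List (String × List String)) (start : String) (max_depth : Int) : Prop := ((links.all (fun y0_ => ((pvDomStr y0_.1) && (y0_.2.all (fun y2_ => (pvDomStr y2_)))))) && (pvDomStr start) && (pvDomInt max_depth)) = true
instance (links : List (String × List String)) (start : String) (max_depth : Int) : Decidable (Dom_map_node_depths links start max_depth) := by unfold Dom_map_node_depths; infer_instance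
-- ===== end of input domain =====

-- B replaces A's deque of (node, depth) pairs by a level-synchronous BFS over frontier lists (alternative decomposition, same cost).


-- ===== PORT A =====
-- A's while-loop over the deque, with a fuel bound (fuelA below) large enough for the loop
-- to always finish before the fuel does (proved in the lemmas section).
def loopA (links : List (String × List String)) (max_depth : Int) :
    Nat → PySem.Set String → PySem.Dict Int (List String) → List (String × Int) →
    PySem.Dict Int (List String)
  | 0, _, bd, _ => bd
  | _ + 1, _, bd, [] => bd
  | f + 1, seen, bd, (node, depth) :: rest =>
    if PySem.Set.contains seen node = true ∨ max_depth < depth then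
      loopA links max_depth f seen bd rest
    else
      loopA links max_depth f (PySem.Set.add seen node)
        (bd.insert depth (bd.getD depth [] ++ [node]))
        (rest ++ (((PySem.Dict.mk links).getD node []).filter
            (fun m => !(PySem.Set.contains (PySem.Set.add seen node) m))).map
            (fun m => (m, depth + 1)))

-- fuel: (#distinct reachable names) * (total link-target count + 1) + 2, always enough
def fuelA (links : List (String × List String)) (start : String) : Nat :=
  (PySem.Set.ofList (start :: (links.map Prod.snd).flatten)).length *
    ((links.map Prod.snd).flatten.length + 1) + 2

def map_node_depths (links : List (String × List String)) (start : String) (max_depth : Int) :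
    List (Int × List String) :=
  if decide (links = []) ||
      (!((PySem.Dict.mk links).contains start) &&
        !((PySem.Dict.mk links).values.any (fun targets => targets.contains start))) then
    [((0 : Int), [start])]
  else
    (loopA links max_depth (fuelA links start) PySem.Set.empty PySem.Dict.empty
      [(start, 0)]).items

-- ===== PORT B =====
-- body of B's inner `for node in frontier` loop; state = (seen, by_depth, nxt)
def stepB (links : List (String × List String)) (depth : Int)
    (st : PySem.Set String × PySem.Dict Int (List String) × List String) (node : String) :
    PySem.Set String × PySem.Dict Int (List String) × List String :=
  if PySem.Set.contains st.1 node = true then st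
  else
    (PySem.Set.add st.1 node,
     st.2.1.insert depth (st.2.1.getD depth [] ++ [node]),
     st.2.2 ++ ((PySem.Dict.mk links).getD node []).filter
         (fun m => !(PySem.Set.contains (PySem.Set.add st.1 node) m)))

-- B's outer `while frontier and depth <= max_depth` loop; the Nat argument is
-- fuel used only as a structural-termination guard: it is called with exactly
-- (max_depth + 1 - depth).toNat, which reaches 0 only when depth > max_depth,
-- where the loop condition stops the loop anyway.
def outerB (links : List (String × List String)) (max_depth : Int) :
    Nat → PySem.Set String → PySem.Dict Int (List String) → List String → Int →
    PySem.Dict Int (List String)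
  | 0, _, bd, _, _ => bd
  | f + 1, seen, bd, frontier, depth =>
    if frontier = [] ∨ max_depth < depth then bd
    else
      outerB links max_depth f
        (frontier.foldl (stepB links depth) (seen, bd, [])).1
        (frontier.foldl (stepB links depth) (seen, bd, [])).2.1
        (frontier.foldl (stepB links depth) (seen, bd, [])).2.2
        (depth + 1)

def map_node_depths_alt (links : List (String × List String)) (start : String) (max_depth : Int) :
    List (Int × List String) :=
  if decide (links = []) ||
      (!((PySem.Dict.mk links).contains start) &&
        !((PySem.Dict.mk links).values.any (fun targets => targets.contains start))) then
    [((0 : Int), [start])]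
  else
    (outerB links max_depth ((max_depth + 1).toNat) PySem.Set.empty PySem.Dict.empty
      [start] 0).items

-- ===== PRECONDITION & SPEC =====
def Spec_map_node_depths (links : List (String × List String)) (start : String) (max_depth : Int) (out : List (Int × List String)) : Prop := out = map_node_depths_alt links start max_depth
instance (links : List (String × List String)) (start : String) (max_depth : Int) (out : List (Int × List String)) : Decidable (Spec_map_node_depths links start max_depth out) := by unfold Spec_map_node_depths; infer_instance

-- ===== CLAIM (what is proved, stated in full; the proofs are below) =====
def Claim_equal_map_node_depths : Prop := ∀ (links : List (String × List String)) (start : String) (max_depth : Int), Dom_map_node_depths links start max_depth → Spec_map_node_depths links start max_depth (map_node_depths links start max_depth)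

-- ===== LEMMAS AND PROOFS =====
-- the universe of names a queue/frontier entry can ever hold
def pvU (links : List (String × List String)) (start : String) : List String :=
  PySem.Set.ofList (start :: (links.map Prod.snd).flatten)

def pvUnseen (links : List (String × List String)) (start : String)
    (seen : PySem.Set String) : Nat :=
  ((pvU links start).filter (fun x => !(PySem.Set.contains seen x))).length

-- the two reductions of B's inner-loop body
lemma stepB_of_contains_true (links : List (String × List String)) (d : Int)
    (sn : PySem.Set String) (b : PySem.Dict Int (List String)) (acc : List String)
    (n : String) (h : PySem.Set.contains sn n = true) :
    stepB links d (sn, b, acc) n = (sn, b, acc) := by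
  unfold stepB
  exact if_pos h

lemma stepB_of_contains_false (links : List (String × List String)) (d : Int)
    (sn : PySem.Set String) (b : PySem.Dict Int (List String)) (acc : List String)
    (n : String) (h : PySem.Set.contains sn n = false) :
    stepB links d (sn, b, acc) n
      = (PySem.Set.add sn n, b.insert d (b.getD d [] ++ [n]),
         acc ++ ((PySem.Dict.mk links).getD n []).filter
           (fun m => !(PySem.Set.contains (PySem.Set.add sn n) m))) := by
  unfold stepB
  exact if_neg (by simpa [PySem.Set.contains] using h)

-- A dict lookup with default [] returns [] or one of the stored value lists
lemma getD_mk_origin (l : List (String × List String)) (k : String) :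
    (PySem.Dict.mk l).getD k [] = [] ∨ (PySem.Dict.mk l).getD k [] ∈ l.map Prod.snd := by
  induction l with
  | nil => left; rfl
  | cons p rest ih =>
    obtain ⟨k', v⟩ := p
    rw [PySem.Dict.getD_eq_get?_getD, PySem.Dict.get?_mk_cons]
    by_cases h : (k' == k) = true
    · right; simp [h]
    · rw [if_neg h, ← PySem.Dict.getD_eq_get?_getD]
      rcases ih with h1 | h1
      · left; exact h1
      · right
        simp only [List.map_cons]
        exact List.mem_cons_of_mem _ h1

lemma mem_flatten_of_mem_mem {L : List (List String)} {l : List String} {x : String}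
    (hl : l ∈ L) (hx : x ∈ l) : x ∈ L.flatten := by
  exact List.mem_flatten.mpr ⟨l, hl, hx⟩

lemma length_le_flatten {L : List (List String)} {l : List String} (hl : l ∈ L) :
    l.length ≤ L.flatten.length := by
  induction L with
  | nil => cases hl
  | cons h t ih =>
    rw [List.flatten_cons, List.length_append]
    rcases List.mem_cons.mp hl with rfl | hm
    · omega
    · have := ih hm; omega

-- marking an unseen universe element reduces the unseen count by exactly one
lemma unseen_add (links : List (String × List String)) (start : String)
    (seen : PySem.Set String) (n : String) (hn : n ∈ pvU links start)
    (hns : PySem.Set.contains seen n = false) :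
    pvUnseen links start (PySem.Set.add seen n) + 1 = pvUnseen links start seen := by
  have hnm : n ∉ seen := by simpa [PySem.Set.contains] using hns
  have hadd : PySem.Set.add seen n = seen ++ [n] := by
    simp [PySem.Set.add, PySem.Set.contains, hnm]
  have hpt : ∀ x, (!(PySem.Set.contains (PySem.Set.add seen n) x))
      = ((x != n) && !(PySem.Set.contains seen x)) := by
    intro x
    rw [hadd]
    simp only [PySem.Set.contains, List.contains_eq_mem, List.mem_append, List.mem_singleton]
    by_cases h1 : x ∈ seen <;> by_cases h2 : x = n <;> simp [h1, h2]
  have hfilter : (pvU links start).filter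
        (fun x => !(PySem.Set.contains (PySem.Set.add seen n) x))
      = ((pvU links start).filter (fun x => !(PySem.Set.contains seen x))).filter
          (fun x => x != n) := by
    rw [List.filter_filter]
    exact List.filter_congr (fun x _ => by rw [hpt x])
  have hndU : (pvU links start).Nodup := PySem.Set.nodup_ofList _
  have hnd2 : ((pvU links start).filter (fun x => !(PySem.Set.contains seen x))).Nodup :=
    hndU.filter _
  have hmem : n ∈ (pvU links start).filter (fun x => !(PySem.Set.contains seen x)) :=
    List.mem_filter.mpr ⟨hn, by simp [PySem.Set.contains, hnm]⟩
  have hpos : 0 < ((pvU links start).filter (fun x => !(PySem.Set.contains seen x))).length :=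
    List.length_pos_of_mem hmem
  unfold pvUnseen
  rw [hfilter, ← List.Nodup.erase_eq_filter hnd2 n, List.length_erase_of_mem hmem]
  omega

-- the loop exits immediately on an empty frontier, whatever the fuel
lemma outerB_frontier_nil (links : List (String × List String)) (max_depth : Int) :
    ∀ (f : Nat) (seen : PySem.Set String) (bd : PySem.Dict Int (List String)) (depth : Int),
    outerB links max_depth f seen bd [] depth = bd := by
  intro f seen bd depth
  cases f with
  | zero => rfl
  | succ f => rw [outerB, if_pos (Or.inl rfl)]

-- the nxt accumulator of B's inner fold is append-only
lemma fold_nxt (links : List (String × List String)) (d : Int) :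
    ∀ (xs : List String) (s : PySem.Set String) (b : PySem.Dict Int (List String))
      (acc : List String),
    xs.foldl (stepB links d) (s, b, acc) =
      ((xs.foldl (stepB links d) (s, b, [])).1,
       (xs.foldl (stepB links d) (s, b, [])).2.1,
       acc ++ (xs.foldl (stepB links d) (s, b, [])).2.2) := by
  intro xs
  induction xs with
  | nil => intro s b acc; simp
  | cons n xs ih =>
    intro s b acc
    simp only [List.foldl_cons]
    by_cases h : PySem.Set.contains s n = true
    · rw [stepB_of_contains_true links d s b acc n h,
          stepB_of_contains_true links d s b [] n h]
      exact ih s b acc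
    · have h' : PySem.Set.contains s n = false := by
        cases hc : PySem.Set.contains s n
        · rfl
        · exact absurd hc h
      rw [stepB_of_contains_false links d s b acc n h',
          stepB_of_contains_false links d s b [] n h']
      rw [ih, ih (PySem.Set.add s n) (b.insert d (b.getD d [] ++ [n]))
            ([] ++ ((PySem.Dict.mk links).getD n []).filter
              (fun m => !(PySem.Set.contains (PySem.Set.add s n) m)))]
      simp [List.append_assoc]

-- the main simulation: A's deque state (level-d remainder xs, collected level-(d+1) part ys)
-- runs to the same dict as B finishing level d from xs and continuing with ys ++ collected nxt
lemma bridge (links : List (String × List String)) (start : String) (max_depth : Int) :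
    ∀ (m fA : Nat) (d : Int) (seen : PySem.Set String) (bd : PySem.Dict Int (List String))
      (xs ys : List String),
    2 * fA + (if xs = [] then 1 else 0) ≤ m →
    (∀ n ∈ xs, n ∈ pvU links start) → (∀ n ∈ ys, n ∈ pvU links start) →
    pvUnseen links start seen * ((links.map Prod.snd).flatten.length + 1)
      + xs.length + ys.length < fA →
    loopA links max_depth fA seen bd
        (xs.map (fun n => (n, d)) ++ ys.map (fun n => (n, d + 1))) =
      (if max_depth < d then bd
       else
         outerB links max_depth ((max_depth - d).toNat)
           (xs.foldl (stepB links d) (seen, bd, [])).1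
           (xs.foldl (stepB links d) (seen, bd, [])).2.1
           (ys ++ (xs.foldl (stepB links d) (seen, bd, [])).2.2)
           (d + 1)) := by
  intro m
  induction m with
  | zero =>
    intro fA d seen bd xs ys hm _ _ hmu
    have hfa : fA = 0 := by omega
    subst hfa
    exact absurd hmu (Nat.not_lt_zero _)
  | succ m ih =>
    intro fA d seen bd xs ys hm hxs hys hmu
    match xs with
    | [] =>
      match ys with
      | [] =>
        obtain ⟨f, rfl⟩ : ∃ f, fA = f + 1 := ⟨fA - 1, by omega⟩
        simp only [List.map_nil, List.nil_append, List.foldl_nil]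
        rw [loopA]
        split
        · rfl
        · simp [outerB_frontier_nil]
      | y :: ys' =>
        have h1 : (([] : List String).map (fun n => (n, d))
              ++ (y :: ys').map (fun n => (n, d + 1)))
            = ((y :: ys').map (fun n => (n, d + 1))
              ++ ([] : List String).map (fun n => (n, d + 1 + 1))) := by simp
        rw [h1]
        have hm' : 2 * fA ≤ m := by
          simp at hm; omega
        have h2 := ih fA (d + 1) seen bd (y :: ys') []
          (by simpa using hm')
          hys (by simp)
          (by simpa using hmu)
        rw [h2]
        simp only [List.foldl_nil, List.nil_append, List.append_nil]
        by_cases hd1 : max_depth < d + 1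
        · rw [if_pos hd1]
          by_cases hd : max_depth < d
          · rw [if_pos hd]
          · rw [if_neg hd]
            rw [show (max_depth - d).toNat = 0 from by omega]
            rfl
        · rw [if_neg hd1]
          have hd : ¬ max_depth < d := by omega
          rw [if_neg hd]
          obtain ⟨g, hg⟩ : ∃ g, (max_depth - d).toNat = g + 1 :=
            ⟨(max_depth - (d + 1)).toNat, by omega⟩
          rw [hg]
          conv_rhs => rw [outerB]
          rw [if_neg (by simp [hd1])]
          rw [show g = (max_depth - (d + 1)).toNat from by omega]
    | n :: xs' =>
      obtain ⟨f, rfl⟩ : ∃ f, fA = f + 1 := ⟨fA - 1, by omega⟩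
      have hnU : n ∈ pvU links start := hxs n (List.mem_cons_self ..)
      have hm' : 2 * f + 1 ≤ m := by
        simp at hm; omega
      simp only [List.map_cons, List.cons_append]
      rw [loopA]
      by_cases hc : PySem.Set.contains seen n = true ∨ max_depth < d
      · rw [if_pos hc]
        have ihr := ih f d seen bd xs' ys
          (by split <;> omega)
          (fun a ha => hxs a (List.mem_cons_of_mem _ ha)) hys
          (by
            generalize pvUnseen links start seen
              * ((links.map Prod.snd).flatten.length + 1) = P at hmu ⊢
            simp only [List.length_cons] at hmu
            omega)
        rw [ihr]
        by_cases hd : max_depth < d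
        · rw [if_pos hd, if_pos hd]
        · have hcn : PySem.Set.contains seen n = true := hc.resolve_right hd
          rw [if_neg hd, if_neg hd]
          simp only [List.foldl_cons,
            stepB_of_contains_true links d seen bd ([] : List String) n hcn]
      · rw [if_neg hc]
        rw [not_or] at hc
        obtain ⟨hcn, hd⟩ := hc
        have hcnf : PySem.Set.contains seen n = false := by
          cases hcc : PySem.Set.contains seen n
          · rfl
          · exact absurd hcc hcn
        set new := ((PySem.Dict.mk links).getD n []).filter
            (fun m => !(PySem.Set.contains (PySem.Set.add seen n) m)) with hnew
        have hq : ((xs'.map (fun a => (a, d)) ++ ys.map (fun a => (a, d + 1)))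
              ++ new.map (fun a => (a, d + 1)))
            = (xs'.map (fun a => (a, d)) ++ (ys ++ new).map (fun a => (a, d + 1))) := by
          simp [List.map_append, List.append_assoc]
        rw [hq]
        have hlen : new.length ≤ (links.map Prod.snd).flatten.length := by
          rcases getD_mk_origin links n with h0 | h0
          · rw [hnew, h0]; simp
          · calc new.length ≤ ((PySem.Dict.mk links).getD n []).length := by
                  rw [hnew]; exact List.length_filter_le _ _
              _ ≤ _ := length_le_flatten h0
        have hun := unseen_add links start seen n hnU hcnf
        have hmemnew : ∀ a ∈ ys ++ new, a ∈ pvU links start := by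
          intro a ha
          rcases List.mem_append.mp ha with h | h
          · exact hys a h
          · rw [hnew] at h
            have ha' : a ∈ (PySem.Dict.mk links).getD n [] := List.mem_of_mem_filter h
            rcases getD_mk_origin links n with h0 | h0
            · rw [h0] at ha'; cases ha'
            · have hfl : a ∈ (links.map Prod.snd).flatten := mem_flatten_of_mem_mem h0 ha'
              exact (PySem.Set.mem_ofList _ a).mpr (List.mem_cons_of_mem _ hfl)
        have ihr := ih f d (PySem.Set.add seen n)
          (bd.insert d (bd.getD d [] ++ [n])) xs' (ys ++ new)
          (by split <;> omega)
          (fun a ha => hxs a (List.mem_cons_of_mem _ ha))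
          hmemnew
          (by
            rw [← hun] at hmu
            rw [show (pvUnseen links start (PySem.Set.add seen n) + 1)
                  * ((links.map Prod.snd).flatten.length + 1)
                = pvUnseen links start (PySem.Set.add seen n)
                  * ((links.map Prod.snd).flatten.length + 1)
                  + (links.map Prod.snd).flatten.length + 1 from by ring] at hmu
            generalize pvUnseen links start (PySem.Set.add seen n)
              * ((links.map Prod.snd).flatten.length + 1) = P at hmu ⊢
            simp only [List.length_cons, List.length_append] at hmu ⊢
            omega)
        rw [ihr]
        by_cases hd' : max_depth < d
        · exact absurd hd' hd
        · rw [if_neg hd', if_neg hd']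
          simp only [List.foldl_cons,
            stepB_of_contains_false links d seen bd ([] : List String) n hcnf,
            List.nil_append]
          rw [← hnew]
          rw [fold_nxt links d xs' (PySem.Set.add seen n)
            (bd.insert d (bd.getD d [] ++ [n])) new]
          simp [List.append_assoc]

-- ===== VERDICT (by name: the statement is the Claim_ definition above) =====
theorem map_node_depths_spec : Claim_equal_map_node_depths := by
  intro links start max_depth _
  unfold Spec_map_node_depths map_node_depths map_node_depths_alt
  by_cases hg : (decide (links = []) ||
      (!((PySem.Dict.mk links).contains start) &&
        !((PySem.Dict.mk links).values.any (fun targets => targets.contains start)))) = true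
  · rw [if_pos hg, if_pos hg]
  · rw [if_neg hg, if_neg hg]
    congr 1
    have hstart : start ∈ pvU links start :=
      (PySem.Set.mem_ofList _ start).mpr (List.mem_cons_self ..)
    have hu0 : pvUnseen links start PySem.Set.empty = (pvU links start).length := by
      simp [pvUnseen, PySem.Set.contains, PySem.Set.empty]
    have hfuel : fuelA links start
        = (pvU links start).length * ((links.map Prod.snd).flatten.length + 1) + 2 := rfl
    have hb := bridge links start max_depth (2 * fuelA links start) (fuelA links start) 0
      PySem.Set.empty PySem.Dict.empty [start] []
      (by simp)
      (fun a ha => by rw [List.mem_singleton] at ha; rw [ha]; exact hstart)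
      (by simp)
      (by
        rw [hu0, hfuel]
        generalize (pvU links start).length
          * ((links.map Prod.snd).flatten.length + 1) = P
        simp)
    rw [show ([((start : String), (0 : Int))] : List (String × Int))
          = ([start].map (fun n => (n, (0 : Int)))
            ++ ([] : List String).map (fun n => (n, (0 : Int) + 1))) from by simp]
    rw [hb]
    by_cases hd : max_depth < 0
    · rw [if_pos hd, show (max_depth + 1).toNat = 0 from by omega]
      rfl
    · rw [if_neg hd]
      obtain ⟨g, hg⟩ : ∃ g, (max_depth + 1).toNat = g + 1 := ⟨max_depth.toNat, by omega⟩
      rw [hg]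
      conv_rhs => rw [outerB]
      rw [if_neg (by simp [hd])]
      rw [show g = (max_depth - 0).toNat from by omega]
      simp
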